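-- pv_equiv track=rewrite | github.com/sugar-syrup/CS142 | assignment5.py | subset_sum_wrapper
-- ===== SOURCE A (Python) =====
-- def subset_sum_wrapper(arr, target, l):
--     arr.sort()
--     aux = abs(arr[0])
--     arr = [i+aux for i in arr]
--     target = target + l*aux
--     def subset_sum(curr, weight, curr_sub):
--         if weight + arr[curr] > target:
--             return False
--         elif weight + arr[curr] == target:
--             if len(curr_sub) == l-1:
--                 return True
--             else:
--                 return False
--         if curr == len(arr) - 1:
--             return False
--         else:
--           out1 = subset_sum(curr+1, weight + arr[curr], curr_sub + [arr[curr]])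
--           out2 = subset_sum(curr+1, weight, curr_sub)
--           return  out1 or out2
--     if subset_sum(0, 0, []):
--         return "It is possible"
--     else:
--         return "It is impossible"
-- ===== SOURCE B (Python) =====
-- def subset_sum_wrapper(arr, target, l):
--     # Iterative DP over reachable sums (alternative algorithm): sums[c] = set of sums of exactly-c-element
--     # subsets of the prefix of arr processed so far.
--     if l < 0 or l > len(arr):
--         return "It is impossible"
--     sums = [{0}] + [set() for _ in range(l)]
--     for x in arr:
--         sums = [sums[0]] + [cur | {s + x for s in prev}
--                             for cur, prev in zip(sums[1:], sums)]
--     return "It is possible" if target in sums[l] else "It is impossible"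
-- ===== Notes on version B (the rewrite author's own statement) =====
-- stated objective: alternative
-- what changed: Replaced A's sort-shift-and-prune backtracking recursion over (index, weight, chosen-subset) state by an iterative DP that sweeps arr once, maintaining for each count c<=l the set of sums achievable by exactly-c-element subsets, then tests target membership.
-- intended difference: When l=0 and target=0, or when l>=2, min(arr)<=0, target=l*min(arr) and min(arr) occurs at least l times, the only witnessing subsets are hit by A's equality-prune (their shifted values are 0) so A returns 'It is impossible' although a subset of exactly l elements summing to target exists; B returns 'It is possible', which is the intended answer. — e.g. on subset_sum_wrapper([-1, -1], -2, 2): A returns "It is impossible", B returns "It is possible"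
import Mathlib
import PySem

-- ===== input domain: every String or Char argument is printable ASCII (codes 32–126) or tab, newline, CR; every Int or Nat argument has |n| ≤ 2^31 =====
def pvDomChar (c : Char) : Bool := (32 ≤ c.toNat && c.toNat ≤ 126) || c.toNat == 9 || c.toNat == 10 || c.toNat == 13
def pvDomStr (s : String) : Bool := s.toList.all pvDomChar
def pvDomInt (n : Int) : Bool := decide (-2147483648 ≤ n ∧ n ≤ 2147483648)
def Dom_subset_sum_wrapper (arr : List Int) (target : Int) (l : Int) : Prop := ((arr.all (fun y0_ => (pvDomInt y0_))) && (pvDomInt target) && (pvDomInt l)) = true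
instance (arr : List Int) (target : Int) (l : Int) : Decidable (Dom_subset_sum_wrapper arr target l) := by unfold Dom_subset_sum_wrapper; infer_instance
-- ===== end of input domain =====

-- B replaces A's sort-shift-and-prune backtracking recursion by an iterative per-count
-- reachable-sums DP (objective: alternative). A sorts its list argument in place; the
-- equivalence proved here is about the RETURN value only.

-- ===== PORT A =====
-- inner function subset_sum(curr, weight, curr_sub); fuel is only a totality guard
-- (initial fuel = arr.length always suffices: the recursion stops at curr = len-1)
def ssA (arr : List Int) (target : Int) (l : Int) : Nat → Nat → Int → List Int → Bool
  | 0, _, _, _ => false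
  | fuel+1, curr, weight, currSub =>
    if weight + arr.getD curr 0 > target then false
    else if weight + arr.getD curr 0 = target then decide ((currSub.length : Int) = l - 1)
    else if curr = arr.length - 1 then false
    else ssA arr target l fuel (curr+1) (weight + arr.getD curr 0) (currSub ++ [arr.getD curr 0]) ||
         ssA arr target l fuel (curr+1) weight currSub

def subset_sum_wrapper (arr : List Int) (target : Int) (l : Int) : String :=
  let srt := PySem.List.sorted arr (fun i => i)          -- arr.sort()
  let aux := |PySem.List.pyGetD srt 0 0|                 -- abs(arr[0]); IndexError on []: excluded by Pre_
  let arr2 := srt.map (fun i => i + aux)                 -- [i+aux for i in arr]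
  let target2 := target + l * aux                        -- target + l*aux
  if ssA arr2 target2 l arr2.length 0 0 [] then "It is possible" else "It is impossible"

-- ===== PORT B =====
-- sums = [sums[0]] + [cur | {s + x for s in prev} for cur, prev in zip(sums[1:], sums)]
def stepB (x : Int) (sums : List (PySem.Set Int)) : List (PySem.Set Int) :=
  match sums with
  | [] => []                                             -- unreachable: sums is always nonempty
  | s0 :: _ =>
    s0 :: (sums.tail.zip sums).map
      (fun cp => PySem.Set.union cp.1 (PySem.Set.ofList (cp.2.map (fun s => s + x))))

def subset_sum_wrapper_alt (arr : List Int) (target : Int) (l : Int) : String :=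
  if l < 0 ∨ (arr.length : Int) < l then "It is impossible"
  else
    -- sums = [{0}] + [set() for _ in range(l)]
    let init : List (PySem.Set Int) :=
      PySem.Set.ofList [0] :: (List.range l.toNat).map (fun _ => PySem.Set.empty)
    let sums := arr.foldl (fun acc x => stepB x acc) init
    if PySem.Set.contains (sums.getD l.toNat PySem.Set.empty) target then "It is possible"
    else "It is impossible"

-- ===== PRECONDITION & SPEC =====
-- A evaluates arr[0] after sorting: on arr = [] Python raises IndexError.
def Pre_subset_sum_wrapper (arr : List Int) (target : Int) (l : Int) : Prop := arr ≠ []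
instance (arr : List Int) (target : Int) (l : Int) : Decidable (Pre_subset_sum_wrapper arr target l) := by
  unfold Pre_subset_sum_wrapper; infer_instance

def pvWitness_subset_sum_wrapper : List Int × Int × Int := ([1, 2, 3], 3, 2)

-- When l=0 and target=0, or when l≥2, min(arr)≤0, target=l*min(arr) and min(arr) occurs
-- at least l times, every witnessing subset is cut off by A's equality prune (all its
-- shifted values are 0), so A returns "It is impossible" although a subset of exactly l
-- elements summing to target exists; B returns "It is possible", the intended answer.
def D_subset_sum_wrapper (arr : List Int) (target : Int) (l : Int) : Prop :=
  (l = 0 ∧ target = 0) ∨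
  (2 ≤ l ∧ arr ≠ [] ∧ arr.min?.getD 0 ≤ 0 ∧ target = l * arr.min?.getD 0 ∧
    l ≤ (arr.count (arr.min?.getD 0) : Int))
instance (arr : List Int) (target : Int) (l : Int) : Decidable (D_subset_sum_wrapper arr target l) := by
  unfold D_subset_sum_wrapper; infer_instance

def Spec_subset_sum_wrapper (arr : List Int) (target : Int) (l : Int) (out : String) : Prop :=
  ¬ D_subset_sum_wrapper arr target l → out = subset_sum_wrapper_alt arr target l
instance (arr : List Int) (target : Int) (l : Int) (out : String) : Decidable (Spec_subset_sum_wrapper arr target l out) := by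
  unfold Spec_subset_sum_wrapper; infer_instance

def pvDiffWitness_subset_sum_wrapper : List Int × Int × Int := ([-1, -1], -2, 2)
def pvDiffWitnessOut_subset_sum_wrapper : String × String := ("It is impossible", "It is possible")

-- ===== CLAIM (what is proved, stated in full; the proofs are below) =====
def Claim_unchanged_subset_sum_wrapper : Prop := ∀ (arr : List Int) (target : Int) (l : Int), Dom_subset_sum_wrapper arr target l → Pre_subset_sum_wrapper arr target l → Spec_subset_sum_wrapper arr target l (subset_sum_wrapper arr target l)
def Claim_changed_subset_sum_wrapper : Prop := Dom_subset_sum_wrapper (pvDiffWitness_subset_sum_wrapper.1) (pvDiffWitness_subset_sum_wrapper.2.1) (pvDiffWitness_subset_sum_wrapper.2.2) ∧ Pre_subset_sum_wrapper (pvDiffWitness_subset_sum_wrapper.1) (pvDiffWitness_subset_sum_wrapper.2.1) (pvDiffWitness_subset_sum_wrapper.2.2) ∧ D_subset_sum_wrapper (pvDiffWitness_subset_sum_wrapper.1) (pvDiffWitness_subset_sum_wrapper.2.1) (pvDiffWitness_subset_sum_wrapper.2.2) ∧ subset_sum_wrapper (pvDiffWitness_subset_sum_wrapper.1) (pvDiffWitness_subset_sum_wrapper.2.1)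 (pvDiffWitness_subset_sum_wrapper.2.2) = pvDiffWitnessOut_subset_sum_wrapper.1 ∧ subset_sum_wrapper_alt (pvDiffWitness_subset_sum_wrapper.1) (pvDiffWitness_subset_sum_wrapper.2.1) (pvDiffWitness_subset_sum_wrapper.2.2) = pvDiffWitnessOut_subset_sum_wrapper.2 ∧ pvDiffWitnessOut_subset_sum_wrapper.1 ≠ pvDiffWitnessOut_subset_sum_wrapper.2
def Claim_exact_subset_sum_wrapper : Prop := ∀ (arr : List Int) (target : Int) (l : Int), Dom_subset_sum_wrapper arr target l → Pre_subset_sum_wrapper arr target l → D_subset_sum_wrapper arr target l → subset_sum_wrapper arr target l ≠ subset_sum_wrapper_alt arr target l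

-- ===== LEMMAS AND PROOFS =====

-- ---- A-side: suffix form of the inner recursion ----
def ssA' (target l : Int) : Nat → List Int → Int → Nat → Bool
  | 0, _, _, _ => false
  | _+1, [], _, _ => false
  | fuel+1, x :: rest, w, c =>
    if w + x > target then false
    else if w + x = target then decide ((c : Int) = l - 1)
    else if rest = [] then false
    else ssA' target l fuel rest (w + x) (c + 1) || ssA' target l fuel rest w c

lemma ssA_eq_ssA' (arr : List Int) (t l : Int) :
    ∀ fuel curr (w : Int) (sub : List Int), curr < arr.length →
      ssA arr t l fuel curr w sub = ssA' t l fuel (arr.drop curr) w sub.length := by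
  intro fuel
  induction fuel with
  | zero => intro curr w sub h
            rw [List.drop_eq_getElem_cons h]; rfl
  | succ fuel ih =>
    intro curr w sub h
    rw [List.drop_eq_getElem_cons h]
    have hget : arr.getD curr 0 = arr[curr] := List.getD_eq_getElem arr 0 h
    have hrest : arr.drop (curr + 1) = [] ↔ curr = arr.length - 1 := by
      rw [List.drop_eq_nil_iff]; omega
    simp only [ssA, ssA', hget]
    by_cases h1 : w + arr[curr] > t
    · simp [h1]
    · simp only [if_neg h1]
      by_cases h2 : w + arr[curr] = t
      · simp [h2]
      · simp only [if_neg h2]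
        by_cases h3 : curr = arr.length - 1
        · rw [if_pos h3, if_pos (hrest.mpr h3)]
        · have h3' : ¬ arr.drop (curr + 1) = [] := fun hh => h3 (hrest.mp hh)
          have hlt : curr + 1 < arr.length := by
            have := List.drop_eq_nil_iff.not.mp (by exact h3')
            omega
          rw [if_neg h3, if_neg h3', ih (curr+1) (w + arr[curr]) (sub ++ [arr[curr]]) hlt,
              ih (curr+1) w sub hlt]
          simp

lemma ssA'_false_of_l_le_zero (t l : Int) (hl : l ≤ 0) :
    ∀ fuel (u : List Int) (w : Int) (c : Nat), ssA' t l fuel u w c = false := by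
  intro fuel
  induction fuel with
  | zero => intro u w c; rfl
  | succ fuel ih =>
    intro u w c
    match u with
    | [] => rfl
    | x :: rest =>
      simp only [ssA', ih]
      split_ifs with h1 h2 h3
      · rfl
      · simp; omega
      · rfl
      · simp

lemma sum_ge_head (x : Int) (S : List Int) (hne : S ≠ []) (hge : ∀ y ∈ S, x ≤ y)
    (hnn : ∀ y ∈ S, 0 ≤ y) : x ≤ S.sum := by
  match S with
  | y :: S' =>
    have h1 : x ≤ y := hge y (by simp)
    have h2 : (0:Int) ≤ S'.sum := List.sum_nonneg (fun z hz => hnn z (by simp [hz]))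
    simp only [List.sum_cons]; omega

lemma ssA'_iff (t l : Int) :
    ∀ fuel (u : List Int) (w : Int) (c : Nat),
      u ≠ [] → u.length ≤ fuel → u.Pairwise (· ≤ ·) → (∀ y ∈ u, 0 ≤ y) → w < t →
      (ssA' t l fuel u w c = true ↔
        ∃ S, S.Sublist u ∧ S ≠ [] ∧ (c : Int) + S.length = l ∧ w + S.sum = t) := by
  intro fuel
  induction fuel with
  | zero => intro u w c hne hlen; exact absurd hlen (by cases u <;> simp_all)
  | succ fuel ih =>
    rintro (_ | ⟨x, rest⟩) w c hne hlen hpw hnn hw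
    · exact absurd rfl hne
    have hx0 : (0:Int) ≤ x := hnn x (by simp)
    have hrest_ge : ∀ y ∈ rest, x ≤ y := (List.pairwise_cons.mp hpw).1
    have hrest_pw : rest.Pairwise (· ≤ ·) := (List.pairwise_cons.mp hpw).2
    have hrest_nn : ∀ y ∈ rest, (0:Int) ≤ y := fun y hy => hnn y (by simp [hy])
    have hmemge : ∀ (S : List Int), S.Sublist (x :: rest) → ∀ y ∈ S, x ≤ y := by
      intro S hS y hy
      rcases List.mem_cons.mp (hS.subset hy) with h | h
      · omega
      · exact hrest_ge y h
    have hmemnn : ∀ (S : List Int), S.Sublist (x :: rest) → ∀ y ∈ S, (0:Int) ≤ y := by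
      intro S hS y hy; exact hnn y (hS.subset hy)
    simp only [ssA']
    by_cases h1 : w + x > t
    · rw [if_pos h1]
      simp only [Bool.false_eq_true, false_iff]
      rintro ⟨S, hS, hSne, hlen', hsum⟩
      have := sum_ge_head x S hSne (hmemge S hS) (hmemnn S hS)
      omega
    · rw [if_neg h1]
      by_cases h2 : w + x = t
      · rw [if_pos h2]
        have hxpos : 0 < x := by omega
        constructor
        · intro hd
          refine ⟨[x], by simp, by simp, ?_, by simpa using h2⟩
          have : (c : Int) = l - 1 := by simpa using hd
          simp; omega
        · rintro ⟨S, hS, hSne, hlen', hsum⟩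
          match S, hSne with
          | y :: S', _ =>
            have hy : x ≤ y := hmemge _ hS y (by simp)
            have hS'nn : (0:Int) ≤ S'.sum :=
              List.sum_nonneg (fun z hz => hmemnn _ hS z (by simp [hz]))
            have hsum' : y + S'.sum = x := by
              simp only [List.sum_cons] at hsum; omega
            have hS'0 : S' = [] := by
              match S' with
              | [] => rfl
              | z :: S'' =>
                have hz : x ≤ z := hmemge _ hS z (by simp)
                have : (0:Int) ≤ S''.sum :=
                  List.sum_nonneg (fun v hv => hmemnn _ hS v (by simp [hv]))
                simp only [List.sum_cons] at hsum'
                omega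
            subst hS'0
            simp only [List.length_cons, List.length_nil] at hlen'
            simp; omega
      · rw [if_neg h2]
        have hwx : w + x < t := by omega
        by_cases h3 : rest = []
        · rw [if_pos h3]
          subst h3
          simp only [Bool.false_eq_true, false_iff]
          rintro ⟨S, hS, hSne, hlen', hsum⟩
          have : S = [x] := by
            cases List.sublist_cons_iff.mp hS with
            | inl h => simp at h; exact absurd h hSne
            | inr h => rcases h with ⟨r, rfl, hr⟩; simp at hr; simp [hr]
          subst this; simp at hsum; omega
        · rw [if_neg h3]
          have hlenr : rest.length ≤ fuel := by simp at hlen; omega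
          rw [Bool.or_eq_true,
            ih rest (w + x) (c + 1) h3 hlenr hrest_pw hrest_nn hwx,
            ih rest w c h3 hlenr hrest_pw hrest_nn hw]
          constructor
          · rintro (⟨S', hS', hne', hl', hs'⟩ | ⟨S, hS, hne', hl', hs'⟩)
            · refine ⟨x :: S', (hS'.cons₂ x), by simp, ?_, ?_⟩
              · simp only [List.length_cons] at *; push_cast at hl' ⊢; omega
              · simp only [List.sum_cons]; omega
            · exact ⟨S, hS.cons x, hne', hl', hs'⟩
          · rintro ⟨S, hS, hne', hl', hs'⟩
            cases List.sublist_cons_iff.mp hS with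
            | inl h => exact Or.inr ⟨S, h, hne', hl', hs'⟩
            | inr h =>
              rcases h with ⟨r, rfl, hr⟩
              left
              have hrne : r ≠ [] := by
                rintro rfl; simp at hs'; omega
              refine ⟨r, hr, hrne, ?_, ?_⟩
              · simp only [List.length_cons] at *; push_cast at hl' ⊢; omega
              · simp only [List.sum_cons] at hs'; omega

-- ---- B-side: DP invariant ----
def SInv (p : List Int) (L : Nat) (sums : List (PySem.Set Int)) : Prop :=
  sums.length = L + 1 ∧ ∀ c, c ≤ L → ∀ s : Int,
    (s ∈ sums.getD c PySem.Set.empty ↔ ∃ S : List Int, S.Sublist p ∧ S.length = c ∧ S.sum = s)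

lemma length_stepB (x : Int) (sums : List (PySem.Set Int)) :
    (stepB x sums).length = sums.length := by
  match sums with
  | [] => rfl
  | s0 :: tl => simp [stepB]

lemma stepB_getD_zero (x : Int) (sums : List (PySem.Set Int)) (h : sums ≠ []) :
    (stepB x sums).getD 0 PySem.Set.empty = sums.getD 0 PySem.Set.empty := by
  match sums with
  | s0 :: tl => rfl

lemma stepB_getD_succ (x : Int) (sums : List (PySem.Set Int)) (c : Nat)
    (h : c + 1 < sums.length) :
    (stepB x sums).getD (c+1) PySem.Set.empty =
      PySem.Set.union (sums.getD (c+1) PySem.Set.empty)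
        (PySem.Set.ofList ((sums.getD c PySem.Set.empty).map (fun s => s + x))) := by
  match sums with
  | s0 :: tl =>
    have htl : c < tl.length := by simp at h; omega
    have hzl : c < ((s0 :: tl).tail.zip (s0 :: tl)).length := by
      simp [List.length_zip]; omega
    simp only [stepB, List.getD_cons_succ]
    rw [List.getD_eq_getElem _ _ (by simpa using hzl)]
    rw [List.getD_eq_getElem tl _ htl]
    rw [List.getD_eq_getElem (s0 :: tl) _ (by simp; omega :  c < (s0 :: tl).length)]
    simp [List.getElem_zip]

lemma SInv_init (L : Nat) :
    SInv [] L (PySem.Set.ofList [0] :: (List.range L).map (fun _ => PySem.Set.empty)) := by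
  constructor
  · simp
  · intro c hc s
    match c with
    | 0 =>
      simp only [List.getD_cons_zero, PySem.Set.mem_ofList]
      constructor
      · intro h; exact ⟨[], by simp, by simp, by simp [List.mem_singleton.mp h]⟩
      · rintro ⟨S, hS, hlen, hsum⟩
        have : S = [] := List.sublist_nil.mp hS
        subst this; simp at hsum ⊢; omega
    | c' + 1 =>
      simp only [List.getD_cons_succ]
      have hc' : c' < L := by omega
      rw [List.getD_eq_getElem _ _ (by simpa using hc')]
      simp only [List.getElem_map]
      constructor
      · intro h; exact absurd h (by simp [PySem.Set.empty])
      · rintro ⟨S, hS, hlen, hsum⟩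
        have : S = [] := List.sublist_nil.mp hS
        subst this; simp at hlen

lemma sublist_concat_iff (S p : List Int) (x : Int) :
    S.Sublist (p ++ [x]) ↔ S.Sublist p ∨ ∃ S1, S = S1 ++ [x] ∧ S1.Sublist p := by
  rw [List.sublist_append_iff]
  constructor
  · rintro ⟨l1, l2, rfl, h1, h2⟩
    rcases List.sublist_cons_iff.mp h2 with h | ⟨r, rfl, hr⟩
    · simp at h; subst h; simp [h1]
    · simp at hr; subst hr; exact Or.inr ⟨l1, rfl, h1⟩
  · rintro (h | ⟨S1, rfl, h1⟩)
    · exact ⟨S, [], by simp, h, by simp⟩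
    · exact ⟨S1, [x], rfl, h1, by simp⟩

lemma SInv_step (p : List Int) (x : Int) (L : Nat) (sums : List (PySem.Set Int))
    (h : SInv p L sums) : SInv (p ++ [x]) L (stepB x sums) := by
  obtain ⟨hlen, hmem⟩ := h
  refine ⟨by rw [length_stepB]; exact hlen, ?_⟩
  intro c hc s
  match c with
  | 0 =>
    rw [stepB_getD_zero x sums (by intro hh; simp [hh] at hlen), hmem 0 (by omega) s]
    constructor
    · rintro ⟨S, hS, hl, hs⟩; exact ⟨S, hS.trans (by simp), hl, hs⟩
    · rintro ⟨S, hS, hl, hs⟩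
      have : S = [] := List.length_eq_zero_iff.mp hl
      subst this; exact ⟨[], by simp, rfl, hs⟩
  | c' + 1 =>
    rw [stepB_getD_succ x sums c' (by omega)]
    rw [PySem.Set.mem_union]
    rw [hmem (c'+1) hc s]
    have hofl : s ∈ PySem.Set.ofList ((sums.getD c' PySem.Set.empty).map (fun s => s + x)) ↔
        ∃ s0, s0 ∈ sums.getD c' PySem.Set.empty ∧ s0 + x = s := by
      rw [PySem.Set.mem_ofList]; simp
    rw [hofl]
    constructor
    · rintro (⟨S, hS, hl, hs⟩ | ⟨s0, hs0, rfl⟩)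
      · exact ⟨S, hS.trans (by simp), hl, hs⟩
      · obtain ⟨S, hS, hl, hs⟩ := (hmem c' (by omega) s0).mp hs0
        exact ⟨S ++ [x], (sublist_concat_iff _ _ _).mpr (Or.inr ⟨S, rfl, hS⟩),
          by simp [hl], by simp [hs]⟩
    · rintro ⟨S, hS, hl, hs⟩
      rcases (sublist_concat_iff _ _ _).mp hS with h | ⟨S1, rfl, h1⟩
      · exact Or.inl ⟨S, h, hl, hs⟩
      · right
        refine ⟨S1.sum, (hmem c' (by omega) S1.sum).mpr ⟨S1, h1, by simp at hl; omega, rfl⟩, ?_⟩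
        simp at hs; omega

lemma SInv_foldl (L : Nat) :
    ∀ (xs p : List Int) (sums : List (PySem.Set Int)), SInv p L sums →
      SInv (p ++ xs) L (xs.foldl (fun acc x => stepB x acc) sums) := by
  intro xs
  induction xs with
  | nil => intro p sums h; simpa using h
  | cons x xs ih =>
    intro p sums h
    have := ih (p ++ [x]) (stepB x sums) (SInv_step p x L sums h)
    simpa using this

lemma B_char (arr : List Int) (t l : Int) :
    subset_sum_wrapper_alt arr t l = "It is possible" ↔
      (0 ≤ l ∧ l ≤ (arr.length : Int) ∧ ∃ S : List Int, S.Sublist arr ∧ (S.length : Int) = l ∧ S.sum = t) := by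
  unfold subset_sum_wrapper_alt
  by_cases hg : l < 0 ∨ (arr.length : Int) < l
  · rw [if_pos hg]
    simp only [String.reduceEq, false_iff]
    rintro ⟨h1, h2, _⟩; omega
  · rw [if_neg hg]
    dsimp only
    have h0l : 0 ≤ l := by omega
    have hln : l ≤ (arr.length : Int) := by omega
    have hinv := SInv_foldl l.toNat arr []
      (PySem.Set.ofList [0] :: (List.range l.toNat).map (fun _ => PySem.Set.empty))
      (SInv_init l.toNat)
    simp only [List.nil_append] at hinv
    by_cases hc : PySem.Set.contains
        ((arr.foldl (fun acc x => stepB x acc)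
          (PySem.Set.ofList [0] :: (List.range l.toNat).map (fun _ => PySem.Set.empty))).getD
          l.toNat PySem.Set.empty) t = true
    · rw [if_pos hc]
      have hmem := (PySem.Set.contains_iff _ _).mp hc
      obtain ⟨S, hS, hl, hs⟩ := (hinv.2 l.toNat (le_refl _) t).mp hmem
      simp only [true_iff]
      exact ⟨h0l, hln, S, hS, by omega, hs⟩
    · rw [if_neg hc]
      simp only [String.reduceEq, false_iff]
      rintro ⟨_, _, S, hS, hl, hs⟩
      exact hc ((PySem.Set.contains_iff _ _).mpr
        ((hinv.2 l.toNat (le_refl _) t).mpr ⟨S, hS, by omega, hs⟩))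

lemma B_out (arr : List Int) (t l : Int) :
    subset_sum_wrapper_alt arr t l = "It is possible" ∨
    subset_sum_wrapper_alt arr t l = "It is impossible" := by
  unfold subset_sum_wrapper_alt
  by_cases hg : l < 0 ∨ (arr.length : Int) < l
  · rw [if_pos hg]; right; rfl
  · rw [if_neg hg]
    dsimp only
    by_cases hc : PySem.Set.contains
        ((arr.foldl (fun acc x => stepB x acc)
          (PySem.Set.ofList [0] :: (List.range l.toNat).map (fun _ => PySem.Set.empty))).getD
          l.toNat PySem.Set.empty) t = true
    · rw [if_pos hc]; left; rfl
    · rw [if_neg hc]; right; rfl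

-- ---- glue ----
lemma sum_map_shift (S : List Int) (aux : Int) :
    (S.map (fun z => z + aux)).sum = S.sum + S.length * aux := by
  rw [show (fun z : Int => z + aux) = (fun z => id z + (fun _ => aux) z) from rfl,
    PySem.List.sum_map_add_int]
  simp [List.map_const', List.sum_replicate]

lemma TL (arr srt : List Int) (aux : Int) (hperm : srt.Perm arr) (k : Nat) (t : Int) :
    (∃ S : List Int, S.Sublist arr ∧ S.length = k ∧ S.sum = t) ↔
    (∃ T : List Int, T.Sublist (srt.map (fun i => i + aux)) ∧ T.length = k ∧ T.sum = t + k * aux) := by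
  constructor
  · rintro ⟨S, hS, hl, hs⟩
    obtain ⟨S', hS'p, hS'⟩ := hS.subperm.trans hperm.symm.subperm
    refine ⟨S'.map (fun i => i + aux), hS'.map _, by simp [hS'p.length_eq, hl], ?_⟩
    rw [sum_map_shift, hS'p.sum_eq, hs, hS'p.length_eq, hl]
  · rintro ⟨T, hT, hl, hs⟩
    obtain ⟨S', hS's, rfl⟩ := List.sublist_map_iff.mp hT
    obtain ⟨S, hSp, hSsub⟩ := hS's.subperm.trans hperm.subperm
    have hlen' : S'.length = k := by simpa using hl
    have hsum' : S'.sum = t := by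
      rw [sum_map_shift, hlen'] at hs; omega
    exact ⟨S, hSsub, by rw [hSp.length_eq, hlen'], by rw [hSp.sum_eq, hsum']⟩

lemma all_zero_of_sum_zero : ∀ (S : List Int), (∀ y ∈ S, 0 ≤ y) → S.sum = 0 → ∀ y ∈ S, y = 0 := by
  intro S
  induction S with
  | nil => intro _ _ y hy; simp at hy
  | cons z S ih =>
    intro hnn hs y hy
    have hz : (0:Int) ≤ z := hnn z (by simp)
    have hS : (0:Int) ≤ S.sum := List.sum_nonneg (fun v hv => hnn v (by simp [hv]))
    simp only [List.sum_cons] at hs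
    rcases List.mem_cons.mp hy with rfl | hy'
    · omega
    · exact ih (fun v hv => hnn v (by simp [hv])) (by omega) y hy'

lemma ZC (b : List Int) (hnn : ∀ y ∈ b, (0:Int) ≤ y) (k : Nat) :
    (∃ T : List Int, T.Sublist b ∧ T.length = k ∧ T.sum = 0) ↔ k ≤ b.count 0 := by
  constructor
  · rintro ⟨T, hT, hl, hs⟩
    have hz := all_zero_of_sum_zero T (fun y hy => hnn y (hT.subset hy)) hs
    have hrep : T = List.replicate k 0 := List.eq_replicate_iff.mpr ⟨hl, hz⟩
    rw [hrep] at hT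
    exact List.replicate_sublist_iff.mp hT
  · intro hk
    exact ⟨List.replicate k 0, List.replicate_sublist_iff.mpr hk, List.length_replicate, by simp⟩

lemma A_out (arr : List Int) (t l : Int) :
    subset_sum_wrapper arr t l = "It is possible" ∨
    subset_sum_wrapper arr t l = "It is impossible" := by
  unfold subset_sum_wrapper
  dsimp only
  split
  · left; rfl
  · right; rfl

lemma A_iff (arr : List Int) (t l : Int) (m : Int) (rest' : List Int)
    (hsrt : PySem.List.sorted arr (fun i => i) = m :: rest') :
    (subset_sum_wrapper arr t l = "It is possible") ↔
      (subset_sum_wrapper_alt arr t l = "It is possible" ∧ ¬ D_subset_sum_wrapper arr t l) := by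
  have hperm : (m :: rest').Perm arr := by
    have := PySem.List.sorted_perm arr (fun i => i) false
    rwa [hsrt] at this
  have hmle : ∀ y ∈ arr, m ≤ y := PySem.List.key_head_sorted_le arr (fun i => i) hsrt
  have hmabs : -|m| ≤ m := neg_abs_le m
  have hpre : arr ≠ [] := by
    intro h
    rw [h] at hperm
    exact absurd hperm.eq_nil (by simp)
  -- shifted array
  have hb_pw : ((m :: rest').map (fun i => i + |m|)).Pairwise (· ≤ ·) := by
    have := PySem.List.sorted_pairwise arr (fun i => i)
    rw [hsrt] at this
    exact List.Pairwise.map _ (fun a b h => by omega) this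
  have hb_nn : ∀ y ∈ (m :: rest').map (fun i => i + |m|), (0:Int) ≤ y := by
    intro y hy
    obtain ⟨z, hz, rfl⟩ := List.mem_map.mp hy
    have : m ≤ z := hmle z (hperm.subset hz)
    omega
  have hmin : arr.min?.getD 0 = m := by
    rw [show arr.min? = some m from List.min?_eq_some_iff.mpr
      ⟨hperm.subset (by simp), hmle⟩]; rfl
  -- A reduced to ssA' on the shifted sorted list
  have hA : subset_sum_wrapper arr t l =
      (if ssA' (t + l * |m|) l ((m :: rest').map (fun i => i + |m|)).length
          ((m :: rest').map (fun i => i + |m|)) 0 0 then "It is possible" else "It is impossible") := by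
    unfold subset_sum_wrapper
    dsimp only
    rw [hsrt]
    have hget : PySem.List.pyGetD (m :: rest') 0 0 = m := by simp [pysem]
    rw [hget]
    have hbr := ssA_eq_ssA' ((m :: rest').map (fun i => i + |m|)) (t + l * |m|) l
      ((m :: rest').map (fun i => i + |m|)).length 0 0 [] (by simp)
    simp only [List.drop_zero, List.length_nil] at hbr
    rw [hbr]
  rw [hA, B_char]
  have hiteposs : ∀ bb : Bool,
      ((if bb then "It is possible" else "It is impossible") = "It is possible") ↔ bb = true := by
    intro bb; cases bb <;> simp
  rw [hiteposs]
  unfold D_subset_sum_wrapper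
  rw [hmin]
  by_cases hl1 : l ≤ 0
  · rw [ssA'_false_of_l_le_zero _ l hl1]
    simp only [Bool.false_eq_true, false_iff]
    rintro ⟨⟨h0l, hlarr, S, hS, hSl, hSs⟩, hnD⟩
    have hl0 : l = 0 := le_antisymm hl1 h0l
    subst hl0
    have : S = [] := List.length_eq_zero_iff.mp (by exact_mod_cast hSl)
    subst this
    simp only [List.sum_nil] at hSs
    exact hnD (Or.inl ⟨rfl, hSs.symm⟩)
  · push_neg at hl1
    have hx0 : (0:Int) ≤ m + |m| := by omega
    rcases lt_trichotomy (t + l * |m|) 0 with hs | hs | hs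
    · -- shifted target negative: both sides false
      have hLHS : ssA' (t + l * |m|) l ((m :: rest').map (fun i => i + |m|)).length
          ((m :: rest').map (fun i => i + |m|)) 0 0 = false := by
        simp only [List.map_cons, List.length_cons, ssA']
        rw [if_pos (by omega : (0:Int) + (m + |m|) > t + l * |m|)]
      rw [hLHS]
      simp only [Bool.false_eq_true, false_iff]
      rintro ⟨⟨h0l, hlarr, S, hS, hSl, hSs⟩, hnD⟩
      obtain ⟨T, hT, hTl, hTs⟩ := (TL arr (m :: rest') |m| hperm S.length t).mp ⟨S, hS, rfl, hSs⟩
      have hTnn : (0:Int) ≤ T.sum :=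
        List.sum_nonneg (fun y hy => hb_nn y (hT.subset hy))
      rw [hSl] at hTs
      omega
    · -- shifted target zero
      have hBposs : (0 ≤ l ∧ l ≤ (arr.length : Int) ∧
          ∃ S : List Int, S.Sublist arr ∧ (S.length : Int) = l ∧ S.sum = t) ↔
          l ≤ (((m :: rest').map (fun i => i + |m|)).count 0 : Int) := by
        constructor
        · rintro ⟨h0l, hlarr, S, hS, hSl, hSs⟩
          obtain ⟨T, hT, hTl, hTs⟩ := (TL arr (m :: rest') |m| hperm S.length t).mp ⟨S, hS, rfl, hSs⟩
          rw [hSl] at hTs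
          have hsum0 : T.sum = 0 := by omega
          have hcle := (ZC _ hb_nn T.length).mp ⟨T, hT, rfl, hsum0⟩
          omega
        · intro hcnt
          have hkc : l.toNat ≤ ((m :: rest').map (fun i => i + |m|)).count 0 := by omega
          obtain ⟨T, hT, hTl, hTs⟩ := (ZC _ hb_nn l.toNat).mpr hkc
          have hlt : (l.toNat : Int) = l := by omega
          obtain ⟨S, hS, hSl, hSs⟩ := (TL arr (m :: rest') |m| hperm l.toNat t).mpr
            ⟨T, hT, hTl, by rw [hTs, hlt]; omega⟩
          refine ⟨by omega, ?_, S, hS, by omega, hSs⟩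
          have := hT.length_le
          simp only [List.length_map, List.length_cons] at this
          rw [hTl] at this
          have harrlen : arr.length = rest'.length + 1 := by
            have := hperm.length_eq; simpa using this.symm
          omega
      rcases eq_or_lt_of_le (by omega : (1:Int) ≤ l) with hl1' | hl2
      · -- l = 1
        have hl1'' : l = 1 := hl1'.symm
        subst hl1''
        have hLHS : ssA' (t + 1 * |m|) 1 ((m :: rest').map (fun i => i + |m|)).length
            ((m :: rest').map (fun i => i + |m|)) 0 0 = decide (m + |m| = 0) := by
          simp only [List.map_cons, List.length_cons, ssA']
          rcases eq_or_lt_of_le hx0 with hxe | hxp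
          · rw [if_neg (by omega), if_pos (by omega)]
            simp [← hxe]
          · rw [if_pos (by omega)]
            simp; omega
        rw [hLHS, hBposs]
        have hnD : ¬ ((1:Int) = 0 ∧ t = 0) ∧ ¬ (2 ≤ (1:Int)) := by constructor <;> simp
        constructor
        · intro h
          have hm0 : m + |m| = 0 := by simpa using h
          refine ⟨?_, ?_⟩
          · rw [show (0:Int) = ((0:Nat):Int) by simp] at hm0
            have : 1 ≤ ((m :: rest').map (fun i => i + |m|)).count 0 := by
              rw [Nat.one_le_iff_ne_zero, ← Nat.pos_iff_ne_zero, List.count_pos_iff]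
              exact List.mem_map.mpr ⟨m, by simp, by omega⟩
            omega
          · rintro (⟨h1, _⟩ | ⟨h2, _⟩)
            · omega
            · omega
        · rintro ⟨hcnt, _⟩
          have : 0 < ((m :: rest').map (fun i => i + |m|)).count 0 := by omega
          have h0mem := List.count_pos_iff.mp this
          obtain ⟨z, hz, hz0⟩ := List.mem_map.mp h0mem
          have : m ≤ z := hmle z (hperm.subset hz)
          simp; omega
      · -- l ≥ 2: LHS false, and B-possible implies D
        have hLHS : ssA' (t + l * |m|) l ((m :: rest').map (fun i => i + |m|)).length
            ((m :: rest').map (fun i => i + |m|)) 0 0 = false := by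
          simp only [List.map_cons, List.length_cons, ssA']
          rcases eq_or_lt_of_le hx0 with hxe | hxp
          · rw [if_neg (by omega), if_pos (by omega)]
            simp; omega
          · rw [if_pos (by omega)]
        rw [hLHS]
        simp only [Bool.false_eq_true, false_iff]
        rintro ⟨hB, hnD⟩
        have hcnt0 := hBposs.mp hB
        have hposc : 0 < ((m :: rest').map (fun i => i + |m|)).count 0 := by omega
        obtain ⟨z, hz, hz0⟩ := List.mem_map.mp (List.count_pos_iff.mp hposc)
        have hmz : m ≤ z := hmle z (hperm.subset hz)
        have habs0 : (0:Int) ≤ |m| := abs_nonneg m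
        have hm_le0 : m ≤ 0 := by omega
        have hm_eq : m = -|m| := by omega
        have ht : t = l * m := by rw [hm_eq, mul_neg]; omega
        have hcount : ((m :: rest').map (fun i => i + |m|)).count 0 = arr.count m := by
          have h1 : ((m :: rest').map (fun i => i + |m|)).count (m + |m|) = (m :: rest').count m :=
            List.count_map_of_injective (m :: rest') (fun i => i + |m|) (add_left_injective |m|) m
          have hm0 : m + |m| = 0 := by omega
          rw [hm0] at h1
          rw [h1, hperm.count_eq]
        rw [hcount] at hcnt0
        exact hnD (Or.inr ⟨by omega, hpre, hm_le0, ht, hcnt0⟩)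
    · -- shifted target positive: exact search, no D
      have hmain := ssA'_iff (t + l * |m|) l ((m :: rest').map (fun i => i + |m|)).length
        ((m :: rest').map (fun i => i + |m|)) 0 0 (by simp) (le_refl _) hb_pw hb_nn hs
      rw [hmain]
      have hnD : ¬ ((l = 0 ∧ t = 0) ∨
          (2 ≤ l ∧ arr ≠ [] ∧ m ≤ 0 ∧ t = l * m ∧ l ≤ ((arr.count m : Nat) : Int))) := by
        rintro (⟨hl0, ht0⟩ | ⟨hl2, _, hm0, ht, _⟩)
        · omega
        · have habs : |m| = -m := abs_of_nonpos hm0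
          rw [ht, habs, mul_neg] at hs
          omega
      simp only [hnD, not_false_eq_true, and_true]
      constructor
      · rintro ⟨T, hT, hTne, hTl, hTs⟩
        obtain ⟨S, hS, hSl, hSs⟩ := (TL arr (m :: rest') |m| hperm T.length t).mpr
          ⟨T, hT, rfl, by
            have hTlen : ((T.length : Nat) : Int) = l := by omega
            rw [hTlen]; omega⟩
        refine ⟨by omega, ?_, S, hS, by omega, hSs⟩
        have h1 := hT.length_le
        have h2 := hperm.length_eq
        simp only [List.length_map, List.length_cons] at h1
        simp only [List.length_cons] at h2
        omega
      · rintro ⟨h0l, hlarr, S, hS, hSl, hSs⟩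
        obtain ⟨T, hT, hTl, hTs⟩ := (TL arr (m :: rest') |m| hperm S.length t).mp ⟨S, hS, rfl, hSs⟩
        refine ⟨T, hT, ?_, by omega, by rw [hSl] at hTs; omega⟩
        intro hTnil
        rw [hTnil] at hTl
        simp at hTl
        rw [← hTl] at hSl
        simp at hSl
        omega

lemma D_B (arr : List Int) (t l : Int) (hpre : arr ≠ [])
    (hD : D_subset_sum_wrapper arr t l) :
    subset_sum_wrapper_alt arr t l = "It is possible" := by
  rw [B_char]
  rcases hD with ⟨hl0, ht0⟩ | ⟨hl2, _, hm0, ht, hcnt⟩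
  · subst hl0; subst ht0
    exact ⟨le_refl _, by positivity, [], by simp, by simp, by simp⟩
  · set m := arr.min?.getD 0 with hm
    have hkc : l.toNat ≤ arr.count m := by omega
    refine ⟨by omega, ?_, List.replicate l.toNat m, List.replicate_sublist_iff.mpr hkc, by simp; omega, ?_⟩
    · have := List.count_le_length (a := m) (l := arr)
      omega
    · rw [List.sum_replicate, nsmul_eq_mul, ht]
      congr 1
      omega

-- ===== VERDICT (by name: the statement is the Claim_ definition above) =====
theorem subset_sum_wrapper_spec : Claim_unchanged_subset_sum_wrapper := by
  intro arr t l hdom hpre hnD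
  obtain ⟨m, rest', hsrt⟩ : ∃ m rest', PySem.List.sorted arr (fun i => i) = m :: rest' := by
    have hl := PySem.List.length_sorted arr (fun i => i) false
    match h : PySem.List.sorted arr (fun i => i) with
    | [] => rw [h] at hl
            cases arr with
            | nil => exact absurd rfl hpre
            | cons a as => simp at hl
    | mm :: r => exact ⟨mm, r, rfl⟩
  have hiff := A_iff arr t l m rest' hsrt
  simp only [hnD, not_false_iff, and_true] at hiff
  rcases A_out arr t l with hA | hA <;> rcases B_out arr t l with hB | hB
  · rw [hA, hB]
  · rw [hB] at hiff
    rw [hA] at hiff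
    exact absurd (hiff.mp rfl) (by decide)
  · rw [hA] at hiff
    rw [hB] at hiff
    exact absurd (hiff.mpr rfl) (by decide)
  · rw [hA, hB]

theorem subset_sum_wrapper_changed : Claim_changed_subset_sum_wrapper := by
  unfold Claim_changed_subset_sum_wrapper; decide

theorem subset_sum_wrapper_tight : Claim_exact_subset_sum_wrapper := by
  intro arr t l hdom hpre hD
  obtain ⟨m, rest', hsrt⟩ : ∃ m rest', PySem.List.sorted arr (fun i => i) = m :: rest' := by
    have hl := PySem.List.length_sorted arr (fun i => i) false
    match h : PySem.List.sorted arr (fun i => i) with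
    | [] => rw [h] at hl
            cases arr with
            | nil => exact absurd rfl hpre
            | cons a as => simp at hl
    | mm :: r => exact ⟨mm, r, rfl⟩
  have hB := D_B arr t l hpre hD
  have hAn : ¬ (subset_sum_wrapper arr t l = "It is possible") := fun hA =>
    ((A_iff arr t l m rest' hsrt).mp hA).2 hD
  rcases A_out arr t l with hA | hA
  · exact absurd hA hAn
  · rw [hA, hB]
    decide
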